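-- pv_equiv track=rewrite | github.com/submergepsc/obsidian_notes | crawl/oiwiki/build_oiwiki_html.py | category_for_group
-- ===== SOURCE A (Python) =====
-- def category_for_group(group: str) -> str:
--     rules = {
--         "入门与语言": {"home", "intro", "lang", "basic", "contest"},
--         "搜索与枚举": {"search"},
--         "数据结构": {"ds"},
--         "图论": {"graph"},
--         "动态规划": {"dp"},
--         "数学": {"math", "geometry"},
--         "字符串": {"string"},
--         "工具与杂项": {"tools", "misc", "topic", "edit-landing"},
--     }
--     for category, groups in rules.items():
--         if group in groups:
--             return category
--     return "其他"
-- ===== SOURCE B (Python) =====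
-- # Binary search over a sorted list of (group, category) pairs instead of
-- # scanning category sets: O(log n) comparisons, different algorithm.
-- _PAIRS = [
--     ("basic", "入门与语言"),
--     ("contest", "入门与语言"),
--     ("dp", "动态规划"),
--     ("ds", "数据结构"),
--     ("edit-landing", "工具与杂项"),
--     ("geometry", "数学"),
--     ("graph", "图论"),
--     ("home", "入门与语言"),
--     ("intro", "入门与语言"),
--     ("lang", "入门与语言"),
--     ("math", "数学"),
--     ("misc", "工具与杂项"),
--     ("search", "搜索与枚举"),
--     ("string", "字符串"),
--     ("tools", "工具与杂项"),
--     ("topic", "工具与杂项"),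
-- ]
--
-- def category_for_group(group: str) -> str:
--     lo, hi = 0, len(_PAIRS)
--     while lo < hi:
--         mid = (lo + hi) // 2
--         key, cat = _PAIRS[mid]
--         if group == key:
--             return cat
--         if group < key:
--             hi = mid
--         else:
--             lo = mid + 1
--     return "其他"
-- ===== Notes on version B (the rewrite author's own statement) =====
-- stated objective: alternative
-- what changed: Replaced the linear scan over a category-to-set dict with a hand-written binary search over a sorted flat list of (group, category) pairs.
import Mathlib
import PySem

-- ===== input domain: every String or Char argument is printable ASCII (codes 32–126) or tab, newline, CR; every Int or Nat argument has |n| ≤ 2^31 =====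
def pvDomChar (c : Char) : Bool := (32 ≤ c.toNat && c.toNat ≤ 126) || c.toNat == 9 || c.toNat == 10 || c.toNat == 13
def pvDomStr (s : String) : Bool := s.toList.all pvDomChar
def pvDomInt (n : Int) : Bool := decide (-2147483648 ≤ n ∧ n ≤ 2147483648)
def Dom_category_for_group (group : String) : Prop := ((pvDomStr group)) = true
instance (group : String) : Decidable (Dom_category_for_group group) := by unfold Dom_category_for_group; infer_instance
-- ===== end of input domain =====

-- B replaces A's linear scan of a category→set dict with a binary search over a sorted flat (group, category) list (alternative algorithm; not claimed faster).

-- ===== PORT A =====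
-- the rules dict of A: insertion-ordered pairs (category, set of groups)
def pvRulesA : List (String × PySem.Set String) :=
  [("入门与语言", PySem.Set.ofList ["home", "intro", "lang", "basic", "contest"]),
   ("搜索与枚举", PySem.Set.ofList ["search"]),
   ("数据结构", PySem.Set.ofList ["ds"]),
   ("图论", PySem.Set.ofList ["graph"]),
   ("动态规划", PySem.Set.ofList ["dp"]),
   ("数学", PySem.Set.ofList ["math", "geometry"]),
   ("字符串", PySem.Set.ofList ["string"]),
   ("工具与杂项", PySem.Set.ofList ["tools", "misc", "topic", "edit-landing"])]

-- the for-loop with early return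
def pvLoopA (group : String) : List (String × PySem.Set String) → String
  | [] => "其他"
  | (category, groups) :: rest =>
      if PySem.Set.contains groups group then category else pvLoopA group rest

def category_for_group (group : String) : String :=
  pvLoopA group pvRulesA

-- ===== PORT B =====
-- the sorted _PAIRS list of Source B
def pvPairsB : List (String × String) :=
  [("basic", "入门与语言"),
   ("contest", "入门与语言"),
   ("dp", "动态规划"),
   ("ds", "数据结构"),
   ("edit-landing", "工具与杂项"),
   ("geometry", "数学"),
   ("graph", "图论"),
   ("home", "入门与语言"),
   ("intro", "入门与语言"),
   ("lang", "入门与语言"),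
   ("math", "数学"),
   ("misc", "工具与杂项"),
   ("search", "搜索与枚举"),
   ("string", "字符串"),
   ("tools", "工具与杂项"),
   ("topic", "工具与杂项")]

-- Source B's while-loop as fuel recursion (the fuel only makes the loop total; 16 ≥ any iteration count);
-- Python's `group < key` on str is PySem.Chars.strLt on the char lists (exact, code-point lexicographic)
def pvBS (group : String) : Nat → Nat → Nat → String
  | 0, _, _ => "其他"
  | fuel + 1, lo, hi =>
      if lo < hi then
        let mid := (lo + hi) / 2
        match pvPairsB[mid]? with
        | some (key, cat) =>
            if group == key then cat
            else if PySem.Chars.strLt group.toList key.toList then pvBS group fuel lo mid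
            else pvBS group fuel (mid + 1) hi
        | none => "其他"
      else "其他"

def category_for_group_alt (group : String) : String :=
  pvBS group 16 0 pvPairsB.length

-- ===== PRECONDITION & SPEC =====
def Spec_category_for_group (group : String) (out : String) : Prop := out = category_for_group_alt group
instance (group : String) (out : String) : Decidable (Spec_category_for_group group out) := by unfold Spec_category_for_group; infer_instance

-- ===== CLAIM =====
def Claim_equal_category_for_group : Prop := ∀ (group : String), Dom_category_for_group group → Spec_category_for_group group (category_for_group group)

-- ===== LEMMAS AND PROOFS =====
-- pvBS can only return "其他" or the category paired with a key equal to g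
lemma pvBS_cases (g : String) : ∀ (fuel lo hi : Nat), pvBS g fuel lo hi = "其他" ∨ ∃ p ∈ pvPairsB, g = p.1 ∧ pvBS g fuel lo hi = p.2 := by
  intro fuel
  induction fuel with
  | zero => intro lo hi; left; rfl
  | succ n ih =>
    intro lo hi
    unfold pvBS
    by_cases hlt : lo < hi
    · simp only [hlt, if_true]
      rcases hget : pvPairsB[(lo + hi) / 2]? with _ | ⟨k, v⟩
      · simp
      · by_cases heq : g = k
        · right
          exact ⟨(k, v), List.mem_of_getElem? hget, heq, by simp [heq]⟩
        · simp only [beq_iff_eq, heq, if_false]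
          by_cases hl : PySem.Chars.strLt g.toList k.toList = true
          · simp only [hl, if_true]; exact ih lo ((lo + hi) / 2)
          · simp only [hl, if_false]; exact ih ((lo + hi) / 2 + 1) hi
    · simp [hlt]

-- ===== VERDICT =====
theorem category_for_group_spec : Claim_equal_category_for_group := by
  intro g _
  unfold Spec_category_for_group
  by_cases h1 : g = "home"
  · subst h1; decide
  by_cases h2 : g = "intro"
  · subst h2; decide
  by_cases h3 : g = "lang"
  · subst h3; decide
  by_cases h4 : g = "basic"
  · subst h4; decide
  by_cases h5 : g = "contest"
  · subst h5; decide
  by_cases h6 : g = "search"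
  · subst h6; decide
  by_cases h7 : g = "ds"
  · subst h7; decide
  by_cases h8 : g = "graph"
  · subst h8; decide
  by_cases h9 : g = "dp"
  · subst h9; decide
  by_cases h10 : g = "math"
  · subst h10; decide
  by_cases h11 : g = "geometry"
  · subst h11; decide
  by_cases h12 : g = "string"
  · subst h12; decide
  by_cases h13 : g = "tools"
  · subst h13; decide
  by_cases h14 : g = "misc"
  · subst h14; decide
  by_cases h15 : g = "topic"
  · subst h15; decide
  by_cases h16 : g = "edit-landing"
  · subst h16; decide
  have hA : category_for_group g = "其他" := by
    simp [category_for_group, pvLoopA, pvRulesA, PySem.Set.contains, PySem.Set.ofList,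
      PySem.Set.add, h1, h2, h3, h4, h5, h6, h7, h8, h9, h10, h11, h12, h13, h14, h15, h16]
  have hB : category_for_group_alt g = "其他" := by
    rcases pvBS_cases g 16 0 pvPairsB.length with hB | ⟨p, hp, hgk, _⟩
    · exact hB
    · exfalso; fin_cases hp <;> simp_all
  rw [hA, hB]
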